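-- pv_equiv track=rewrite | github.com/lisaover/MITxCompSciPython | StructuredTypes/wk3_tuples-lists-dicts.py | biggest
-- ===== SOURCE A (Python) =====
-- def biggest(aDict):
--     '''
--     aDict: A dictionary, where all the values are lists.
--
--     returns: The key with the largest number of values associated with it
--     '''
--     if len(aDict) == 0:
--         return None
--     else:
--         length = []
--         values = aDict.values()
--         for value in values:
--             length.append(len(value))
--         for key, value in aDict.items():
--             if len(value) == max(length):
--                 return key
-- ===== SOURCE B (Python) =====
-- def biggest(aDict):
--     '''
--     aDict: A dictionary, where all the values are lists.
--
--     returns: The key with the largest number of values associated with it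
--     '''
--     best_key = None
--     best_len = -1
--     for key, value in aDict.items():
--         if len(value) > best_len:
--             best_key = key
--             best_len = len(value)
--     return best_key
-- ===== Notes on version B (the rewrite author's own statement) =====
-- stated objective: simpler
-- what changed: Replaces A's build-a-lengths-list-then-rescan-with-max(recomputed-per-item) structure by a single running-maximum pass keeping (best_key, best_len), updating only on strictly greater length so the first key on ties wins and None falls out for the empty dict.
import Mathlib
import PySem

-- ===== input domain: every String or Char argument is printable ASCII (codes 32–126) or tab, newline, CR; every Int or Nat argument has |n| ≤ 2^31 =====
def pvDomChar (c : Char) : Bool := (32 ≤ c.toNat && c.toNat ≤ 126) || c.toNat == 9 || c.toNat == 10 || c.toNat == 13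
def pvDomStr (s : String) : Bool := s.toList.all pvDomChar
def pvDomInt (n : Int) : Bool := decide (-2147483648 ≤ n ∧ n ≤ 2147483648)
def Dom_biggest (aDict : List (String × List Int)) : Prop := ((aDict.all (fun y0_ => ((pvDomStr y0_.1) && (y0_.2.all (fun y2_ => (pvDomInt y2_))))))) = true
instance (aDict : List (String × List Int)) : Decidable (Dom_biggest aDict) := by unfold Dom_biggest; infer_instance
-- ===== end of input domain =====

-- B replaces A's build-a-lengths-list-then-rescan-with-max structure by one running-maximum
-- pass over the items (simpler, single pass); equal on every input.


-- ===== PORT A =====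
-- the second loop of A: return the first key whose value's length equals max(length)
-- (max(length) is recomputed each iteration, as in A's source)
def findLoopA (length : List Int) : List (String × List Int) → Option String
  | [] => none
  | (k, v) :: rest =>
      if some ((v.length : Int)) = PySem.List.max? length (fun x => x) then some k
      else findLoopA length rest

def biggest (aDict : List (String × List Int)) : Option String :=
  if aDict.length = 0 then none
  else
    let length := (aDict.map Prod.snd).foldl (fun acc v => acc ++ [(v.length : Int)]) []
    findLoopA length aDict

-- ===== PORT B =====
def stepB (acc : Option String × Int) (kv : String × List Int) : Option String × Int :=
  if (kv.2.length : Int) > acc.2 then (some kv.1, (kv.2.length : Int)) else acc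

def biggest_alt (aDict : List (String × List Int)) : Option String :=
  (aDict.foldl stepB (none, -1)).1

-- ===== PRECONDITION & SPEC =====
def Spec_biggest (aDict : List (String × List Int)) (out : Option String) : Prop := out = biggest_alt aDict
instance (aDict : List (String × List Int)) (out : Option String) : Decidable (Spec_biggest aDict out) := by unfold Spec_biggest; infer_instance

-- ===== CLAIM (what is proved, stated in full; the proofs are below) =====
def Claim_equal_biggest : Prop := ∀ (aDict : List (String × List Int)), Dom_biggest aDict → Spec_biggest aDict (biggest aDict)

-- ===== LEMMAS AND PROOFS =====

-- running maximum of the value lengths, seeded with b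
def maxLen (b : Int) (l : List (String × List Int)) : Int :=
  l.foldl (fun a kv => max a ((kv.2.length : Int))) b

-- first key whose value length equals M
def findAux (M : Int) : List (String × List Int) → Option String
  | [] => none
  | (k, v) :: rest => if (v.length : Int) = M then some k else findAux M rest

theorem lenlist (l : List (List Int)) (init : List Int) :
    l.foldl (fun acc v => acc ++ [(v.length : Int)]) init
      = init ++ l.map (fun v => (v.length : Int)) := by
  induction l generalizing init with
  | nil => simp [List.foldl]
  | cons h t ih => simp [List.foldl, ih, List.append_assoc]

theorem maxLen_ge (t : List (String × List Int)) (b : Int) : b ≤ maxLen b t := by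
  induction t generalizing b with
  | nil => simp [maxLen]
  | cons h tl ih =>
      have := ih (max b ((h.2.length : Int)))
      simp only [maxLen, List.foldl] at *
      exact le_trans (le_max_left _ _) this

theorem maxLen_le_of_mem (t : List (String × List Int)) (b : Int) (kv : String × List Int)
    (h : kv ∈ t) : (kv.2.length : Int) ≤ maxLen b t := by
  induction t generalizing b with
  | nil => cases h
  | cons hd tl ih =>
      cases h with
      | head =>
          simp only [maxLen, List.foldl]
          exact le_trans (le_max_right _ _) (maxLen_ge tl _)
      | tail _ h => exact ih _ h

theorem maxLen_eq_self (t : List (String × List Int)) (b : Int)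
    (h : ∀ kv ∈ t, (kv.2.length : Int) ≤ b) : maxLen b t = b := by
  induction t generalizing b with
  | nil => rfl
  | cons hd tl ih =>
      simp only [maxLen, List.foldl]
      have hb : max b ((hd.2.length : Int)) = b :=
        max_eq_left (h hd (List.mem_cons_self))
      rw [hb]
      exact ih b (fun kv hk => h kv (List.mem_cons_of_mem _ hk))

theorem fold_no (t : List (String × List Int)) (ok : Option String) (b : Int)
    (h : ∀ kv ∈ t, (kv.2.length : Int) ≤ b) : t.foldl stepB (ok, b) = (ok, b) := by
  induction t with
  | nil => rfl
  | cons hd tl ih =>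
      have hhd : ¬ ((hd.2.length : Int) > b) := not_lt.mpr (h hd (List.mem_cons_self))
      simp only [List.foldl, stepB, if_neg hhd]
      exact ih (fun kv hk => h kv (List.mem_cons_of_mem _ hk))

theorem foldB_eq_findAux (items : List (String × List Int)) (ok : Option String) (b : Int)
    (h : ∃ kv ∈ items, b < (kv.2.length : Int)) :
    (items.foldl stepB (ok, b)).1 = findAux (maxLen b items) items := by
  induction items generalizing ok b with
  | nil => rcases h with ⟨kv, hk, _⟩; cases hk
  | cons hd tl ih =>
      obtain ⟨k, v⟩ := hd
      by_cases hb : b < (v.length : Int)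
      · have hmax : max b ((v.length : Int)) = (v.length : Int) := max_eq_right (le_of_lt hb)
        have hstep : stepB (ok, b) (k, v) = (some k, (v.length : Int)) := by
          simp [stepB, hb]
        have hml : maxLen b ((k, v) :: tl) = maxLen ((v.length : Int)) tl := by
          simp only [maxLen, List.foldl]; rw [hmax]
        by_cases h2 : ∃ kv ∈ tl, (v.length : Int) < (kv.2.length : Int)
        · rcases h2 with ⟨kv, hk, hkl⟩
          have hgt : (v.length : Int) < maxLen ((v.length : Int)) tl :=
            lt_of_lt_of_le hkl (maxLen_le_of_mem tl _ kv hk)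
          rw [hml]
          simp only [List.foldl, hstep, findAux]
          rw [if_neg (ne_of_lt hgt)]
          exact ih (some k) _ ⟨kv, hk, hkl⟩
        · push Not at h2
          have hml2 : maxLen b ((k, v) :: tl) = (v.length : Int) := by
            rw [hml]; exact maxLen_eq_self tl _ h2
          rw [hml2]
          simp [List.foldl, hstep, fold_no tl (some k) _ h2, findAux]
      · push Not at hb
        rcases h with ⟨kv, hk, hkl⟩
        cases hk with
        | head => exact absurd hkl (not_lt.mpr hb)
        | tail _ hk =>
          have hmax : max b ((v.length : Int)) = b := max_eq_left hb
          have hstep : stepB (ok, b) (k, v) = (ok, b) := by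
            simp [stepB, not_lt.mpr hb]
          have hml : maxLen b ((k, v) :: tl) = maxLen b tl := by
            simp only [maxLen, List.foldl]; rw [hmax]
          have hgt : b < maxLen b tl := lt_of_lt_of_le hkl (maxLen_le_of_mem tl b kv hk)
          have hne : (v.length : Int) ≠ maxLen b tl := ne_of_lt (lt_of_le_of_lt hb hgt)
          rw [hml]
          simp only [List.foldl, hstep, findAux]
          rw [if_neg hne]
          exact ih ok b ⟨kv, hk, hkl⟩

theorem findLoopA_eq_findAux (length : List Int) (M : Int)
    (h : PySem.List.max? length (fun x => x) = some M)
    (items : List (String × List Int)) : findLoopA length items = findAux M items := by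
  induction items with
  | nil => rfl
  | cons hd tl ih =>
      obtain ⟨k, v⟩ := hd
      simp only [findLoopA, findAux, h, Option.some_inj, ih]

theorem max?_lens (k : String) (v : List Int) (t : List (String × List Int)) :
    PySem.List.max? (((k, v) :: t).map (fun kv => ((kv.2.length : Int)))) (fun x => x)
      = some (maxLen (-1) ((k, v) :: t)) := by
  have hn : max (-1 : Int) ((v.length : Int)) = (v.length : Int) :=
    max_eq_right (by omega)
  simp only [List.map_cons, PySem.List.max?_id_cons, List.foldl_map, Option.some_inj]
  simp only [maxLen, List.foldl]
  rw [hn]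

-- ===== VERDICT (by name: the statement is the Claim_ definition above) =====
theorem biggest_spec : Claim_equal_biggest := by
  intro aDict _
  unfold Spec_biggest
  cases aDict with
  | nil => rfl
  | cons hd tl =>
      obtain ⟨k, v⟩ := hd
      have hex : ∃ kv ∈ (k, v) :: tl, (-1 : Int) < (kv.2.length : Int) :=
        ⟨(k, v), List.mem_cons_self, by omega⟩
      have hmap : (((k, v) :: tl).map Prod.snd).foldl (fun acc v => acc ++ [(v.length : Int)]) []
          = ((k, v) :: tl).map (fun kv => ((kv.2.length : Int))) := by
        rw [lenlist]; simp [List.map_map, Function.comp]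
      simp only [biggest, biggest_alt, List.length_cons, hmap]
      rw [if_neg (by omega)]
      rw [findLoopA_eq_findAux _ _ (max?_lens k v tl)]
      exact (foldB_eq_findAux ((k, v) :: tl) none (-1) hex).symm
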